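-- pv_equiv track=rewrite | github.com/smuradoglu/phc | phonotactic_corpora_analysis1.py | ptj_clean
-- ===== SOURCE A (Python) =====
-- def ptj_clean(lexical_list):
--     headword =[]
--     pos=[]
--     gloss=[]
--     #Go over each lexeme
--     for i in range(len(lexical_list)):
--         lexeme = lexical_list[i]
--         if [k for k in lexeme if '\lx ' in k] !=[]:
--             l = [k for k in lexeme if '\lx ' in k]
--             lx_clean = l[0].split('\lx ')[-1].split('\n')[0]
--             headword.append(lx_clean)
--         else:
--             headword.append('-')
--         if [l for l in lexeme if '\ps ' in l] !=[]:
--             p = [l for l in lexeme if '\ps ' in l]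
--             ps_clean = p[0].split('\ps ')[-1].split('\n')[0]
--             pos.append(ps_clean)
--         else:
--             pos.append('-')
--         if [m for m in lexeme if '\de ' in m] !=[]:
--             d = [m for m in lexeme if '\de ' in m]
--
--             de_clean = d[0].split('\de ')[-1].split('\n')[0]
--             gloss.append(de_clean)
--         else:
--             gloss.append('-')
--
--     return headword, pos, gloss
-- ===== SOURCE B (Python) =====
-- def ptj_clean(lexical_list):
--     headword = []
--     pos = []
--     gloss = []
--     for lexeme in lexical_list:
--         lx = ps = de = None
--         # one dispatching pass over the lines; first match wins for each field
--         for line in lexeme: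
--             if lx is None and '\lx ' in line:
--                 lx = line.split('\lx ')[-1].split('\n')[0]
--             if ps is None and '\ps ' in line:
--                 ps = line.split('\ps ')[-1].split('\n')[0]
--             if de is None and '\de ' in line:
--                 de = line.split('\de ')[-1].split('\n')[0]
--         headword.append(lx if lx is not None else '-')
--         pos.append(ps if ps is not None else '-')
--         gloss.append(de if de is not None else '-')
--     return headword, pos, gloss
-- ===== Notes on version B (the rewrite author's own statement) =====
-- stated objective: alternative
-- what changed: Replaces A's six filtering comprehensions per lexeme (two identical list comprehensions per field) with a single dispatching pass over the lines maintaining three first-match accumulators, appending the recorded value or '-' after the pass.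
import Mathlib
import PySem

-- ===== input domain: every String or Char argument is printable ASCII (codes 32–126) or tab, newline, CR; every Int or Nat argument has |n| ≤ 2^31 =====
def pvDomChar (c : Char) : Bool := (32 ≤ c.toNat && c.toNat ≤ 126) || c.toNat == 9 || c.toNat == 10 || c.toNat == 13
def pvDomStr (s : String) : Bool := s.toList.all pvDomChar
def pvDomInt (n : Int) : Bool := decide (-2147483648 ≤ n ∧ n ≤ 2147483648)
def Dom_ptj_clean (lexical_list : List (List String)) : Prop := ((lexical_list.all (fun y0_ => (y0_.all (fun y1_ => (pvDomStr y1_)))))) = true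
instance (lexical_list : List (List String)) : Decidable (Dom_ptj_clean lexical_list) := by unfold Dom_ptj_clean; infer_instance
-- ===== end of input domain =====

-- B replaces A's six filtering comprehensions per lexeme by a single dispatching pass
-- over the lines keeping one first-match accumulator per field (same return value).

-- shared field extraction: line.split(sep)[-1].split('\n')[0]
def pvClean (line : String) (sep : String) : String :=
  (((PySem.Str.split? (((PySem.Str.split? line sep).getD []).getLastD "") "\n").getD []).headD "")

-- ===== PORT A =====
-- A's per-field block: filter the lexeme's lines by substring containment, take the first
def pvFieldA (lexeme : List String) (sep : String) : String :=
  if lexeme.filter (fun k => PySem.Str.isIn sep k) ≠ [] then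
    pvClean ((lexeme.filter (fun k => PySem.Str.isIn sep k)).headD "") sep
  else "-"

def pvStepLexA (acc : List String × List String × List String) (lexeme : List String) :
    List String × List String × List String :=
  (acc.1 ++ [pvFieldA lexeme "\\lx "],
   acc.2.1 ++ [pvFieldA lexeme "\\ps "],
   acc.2.2 ++ [pvFieldA lexeme "\\de "])

def ptj_clean (lexical_list : List (List String)) : List String × List String × List String :=
  (PySem.List.pyRange 0 (PySem.List.len lexical_list)).foldl
    (fun acc i => pvStepLexA acc (PySem.List.pyGetD lexical_list i []))
    ([], [], [])

-- ===== PORT B =====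
-- 'if <field> is None and sep in line: <field> = clean(line, sep)'
def pvStep (sep : String) (acc : Option String) (line : String) : Option String :=
  if acc.isNone && PySem.Str.isIn sep line then some (pvClean line sep) else acc

def pvStepLexB (acc : List String × List String × List String) (lexeme : List String) :
    List String × List String × List String :=
  let r := lexeme.foldl
    (fun (s : Option String × Option String × Option String) line =>
      (pvStep "\\lx " s.1 line, pvStep "\\ps " s.2.1 line, pvStep "\\de " s.2.2 line))
    (none, none, none)
  (acc.1 ++ [r.1.getD "-"], acc.2.1 ++ [r.2.1.getD "-"], acc.2.2 ++ [r.2.2.getD "-"])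

def ptj_clean_alt (lexical_list : List (List String)) : List String × List String × List String :=
  lexical_list.foldl pvStepLexB ([], [], [])

-- ===== PRECONDITION & SPEC =====
def Spec_ptj_clean (lexical_list : List (List String)) (out : List String × List String × List String) : Prop := out = ptj_clean_alt lexical_list
instance (lexical_list : List (List String)) (out : List String × List String × List String) : Decidable (Spec_ptj_clean lexical_list out) := by unfold Spec_ptj_clean; infer_instance

-- ===== CLAIM (what is proved, stated in full; the proofs are below) =====
def Claim_equal_ptj_clean : Prop := ∀ (lexical_list : List (List String)), Dom_ptj_clean lexical_list → Spec_ptj_clean lexical_list (ptj_clean lexical_list)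

-- ===== LEMMAS AND PROOFS =====

-- B's triple inner fold splits into three independent one-field folds
theorem pv_fold_triple (lexeme : List String) (x y z : Option String) :
    lexeme.foldl
      (fun (s : Option String × Option String × Option String) line =>
        (pvStep "\\lx " s.1 line, pvStep "\\ps " s.2.1 line, pvStep "\\de " s.2.2 line))
      (x, y, z)
    = (lexeme.foldl (fun a l => pvStep "\\lx " a l) x,
       lexeme.foldl (fun a l => pvStep "\\ps " a l) y,
       lexeme.foldl (fun a l => pvStep "\\de " a l) z) := by
  induction lexeme generalizing x y z with
  | nil => rfl
  | cons h t ih => simp [List.foldl, ih]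

theorem pv_fold_some (sep : String) (t : List String) (v : String) :
    t.foldl (fun a l => pvStep sep a l) (some v) = some v := by
  induction t with
  | nil => rfl
  | cons h t ih => simpa [List.foldl, pvStep] using ih

-- one-field first-match fold = head of A's filter
theorem pv_field_eq (sep : String) (lexeme : List String) :
    (lexeme.foldl (fun a l => pvStep sep a l) none).getD "-" = pvFieldA lexeme sep := by
  induction lexeme with
  | nil => rfl
  | cons h t ih =>
    simp only [List.foldl]
    by_cases hh : PySem.Chars.isIn sep.toList h.toList = true
    · rw [show pvStep sep none h = some (pvClean h sep) from by simp [pvStep, hh]]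
      rw [pv_fold_some]
      simp [pvFieldA, hh]
    · rw [show pvStep sep none h = none from by simp [pvStep, hh]]
      rw [ih]
      have hf : PySem.Str.isIn sep h = false := by simpa using hh
      simp only [pvFieldA, List.filter_cons, hf, Bool.false_eq_true, if_false]

theorem pv_step_eq (acc : List String × List String × List String) (lexeme : List String) :
    pvStepLexB acc lexeme = pvStepLexA acc lexeme := by
  simp [pvStepLexB, pvStepLexA, pv_fold_triple, pv_field_eq]

-- ===== VERDICT (by name: the statement is the Claim_ definition above) =====
theorem ptj_clean_spec : Claim_equal_ptj_clean := by
  intro ll _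
  show ptj_clean ll = ptj_clean_alt ll
  unfold ptj_clean ptj_clean_alt
  rw [PySem.List.foldl_pyRange_zero_pyGetD ll [] pvStepLexA ([], [], [])]
  exact (PySem.List.foldl_congr_mem _ _ _ _ (fun acc a _ => pv_step_eq acc a)).symm
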